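-- pv_equiv track=rewrite | github.com/alexvornsand/advent-of-code-2019 | solutions/day-01/day-01.py | measureFuel
-- ===== SOURCE A (Python) =====
-- import math
--
-- def measureFuel(masses, partTwo=False):
--     if partTwo is False:
--         return(sum([math.floor(mass / 3) - 2 for mass in masses]))
--     else:
--         fuel = 0
--         for mass in masses:
--             outStandingMass = mass
--             while(True):
--                 newFuel = math.floor(outStandingMass / 3) - 2
--                 if newFuel > 0:
--                     fuel += newFuel
--                     outStandingMass = newFuel
--                 else:
--                     break
--         return(fuel)
-- ===== SOURCE B (Python) =====
-- def measureFuel(masses, partTwo=False):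
--     total = 0
--     stack = list(masses)
--     while stack:
--         m = stack.pop()
--         f = m // 3 - 2
--         if partTwo is False:
--             total += f
--         elif f > 0:
--             total += f
--             stack.append(f)
--     return total
-- ===== Notes on version B (the rewrite author's own statement) =====
-- stated objective: alternative
-- what changed: A's two-branch structure (list-comprehension sum for part one, nested for/while loops for part two) is replaced by a single uniform worklist loop: masses are popped from a stack, each fuel step is added to a running total, and in part two positive fuel is pushed back onto the stack instead of being chased in an inner loop.
import Mathlib
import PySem

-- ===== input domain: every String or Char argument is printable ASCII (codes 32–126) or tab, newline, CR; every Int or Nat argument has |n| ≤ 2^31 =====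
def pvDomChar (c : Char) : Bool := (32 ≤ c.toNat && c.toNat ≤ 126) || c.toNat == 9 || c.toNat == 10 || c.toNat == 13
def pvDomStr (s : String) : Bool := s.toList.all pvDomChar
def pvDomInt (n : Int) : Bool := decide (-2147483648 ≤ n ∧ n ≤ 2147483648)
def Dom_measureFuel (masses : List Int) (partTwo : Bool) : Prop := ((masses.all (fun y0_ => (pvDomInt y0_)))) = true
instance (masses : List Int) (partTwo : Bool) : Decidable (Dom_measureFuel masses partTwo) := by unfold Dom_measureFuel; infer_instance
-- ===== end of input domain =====

-- B replaces A's two-branch structure (comprehension sum / nested for+while loops) by one uniform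
-- worklist loop over a stack of pending masses (objective: alternative). math.floor(mass/3) is
-- exact integer floor division for |mass| ≤ 2^31, ported as PySem.Int.floordiv.

-- termination fact shared by both ports: a positive fuel step strictly shrinks the mass
theorem pvFuelStep_lt {m : Int} (h : 0 < PySem.Int.floordiv m 3 - 2) :
    (PySem.Int.floordiv m 3 - 2).toNat < m.toNat := by
  have h3 : (3 : Int) ≤ PySem.Int.floordiv m 3 := by omega
  have h9 : (9 : Int) ≤ m := by
    have := (PySem.Int.le_floordiv_iff_mul_le (a := m) (b := 3) (q := 3) (by norm_num)).mp h3
    omega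
  have hlt : PySem.Int.floordiv m 3 < m :=
    (PySem.Int.floordiv_lt_iff_lt_mul (a := m) (b := 3) (q := m) (by norm_num)).mpr (by omega)
  omega

-- ===== PORT A =====
-- the inner while(True) loop of part two, carrying the running total `fuel`
def measureFuelLoop (fuel : Int) (outStandingMass : Int) : Int :=
  let newFuel := PySem.Int.floordiv outStandingMass 3 - 2
  if h : newFuel > 0 then measureFuelLoop (fuel + newFuel) newFuel
  else fuel
termination_by outStandingMass.toNat
decreasing_by exact pvFuelStep_lt h

def measureFuel (masses : List Int) (partTwo : Bool) : Int :=
  if partTwo = false then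
    ((masses.map (fun mass => PySem.Int.floordiv mass 3 - 2)).sum)
  else
    masses.foldl (fun fuel mass => measureFuelLoop fuel mass) 0

-- measure bookkeeping for the worklist termination
theorem pvMeasure_pop (stack : List Int) (h : stack ≠ []) :
    ((stack.map Int.toNat).sum + stack.length)
      = ((stack.dropLast.map Int.toNat).sum + stack.dropLast.length)
        + (stack.getLast h).toNat + 1 := by
  conv_lhs => rw [← List.dropLast_concat_getLast h]
  simp [List.map_append]
  omega

theorem pvMeasure_push (rest : List Int) (f : Int) :
    (((rest ++ [f]).map Int.toNat).sum + (rest ++ [f]).length)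
      = ((rest.map Int.toNat).sum + rest.length) + f.toNat + 1 := by
  simp [List.map_append]
  omega

-- ===== PORT B =====
-- Source B's single while-loop: pop the top of the stack, add the fuel step, push positive fuel back
def measureFuelWork (partTwo : Bool) (total : Int) (stack : List Int) : Int :=
  if h : stack = [] then total
  else
    let m := stack.getLast h
    let rest := stack.dropLast
    let f := PySem.Int.floordiv m 3 - 2
    if partTwo = false then measureFuelWork partTwo (total + f) rest
    else if hf : f > 0 then measureFuelWork partTwo (total + f) (rest ++ [f])
    else measureFuelWork partTwo total rest
termination_by (stack.map Int.toNat).sum + stack.length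
decreasing_by
  · have := pvMeasure_pop stack h
    omega
  · have h1 := pvMeasure_pop stack h
    have h2 := pvMeasure_push stack.dropLast (PySem.Int.floordiv (stack.getLast h) 3 - 2)
    have hlt := pvFuelStep_lt (m := stack.getLast h) hf
    omega
  · have := pvMeasure_pop stack h
    omega

def measureFuel_alt (masses : List Int) (partTwo : Bool) : Int :=
  measureFuelWork partTwo 0 masses

-- ===== PRECONDITION & SPEC =====
def Spec_measureFuel (masses : List Int) (partTwo : Bool) (out : Int) : Prop := out = measureFuel_alt masses partTwo
instance (masses : List Int) (partTwo : Bool) (out : Int) : Decidable (Spec_measureFuel masses partTwo out) := by unfold Spec_measureFuel; infer_instance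

-- ===== CLAIM (what is proved, stated in full; the proofs are below) =====
def Claim_equal_measureFuel : Prop := ∀ (masses : List Int) (partTwo : Bool), Dom_measureFuel masses partTwo → Spec_measureFuel masses partTwo (measureFuel masses partTwo)

-- ===== LEMMAS AND PROOFS =====
-- proof-side characterisation of the whole fuel chain of one mass
def fuelFor (m : Int) : Int :=
  let f := PySem.Int.floordiv m 3 - 2
  if f ≤ 0 then 0 else f + fuelFor f
termination_by m.toNat
decreasing_by exact pvFuelStep_lt (by omega)

theorem measureFuelLoop_eq (fuel m : Int) : measureFuelLoop fuel m = fuel + fuelFor m := by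
  rw [measureFuelLoop, fuelFor]
  by_cases h : PySem.Int.floordiv m 3 - 2 > 0
  · simp only [h, dif_pos, if_neg (by omega : ¬ PySem.Int.floordiv m 3 - 2 ≤ 0)]
    rw [measureFuelLoop_eq]
    ring
  · simp only [dif_neg h, if_pos (by omega : PySem.Int.floordiv m 3 - 2 ≤ 0)]
    ring
termination_by m.toNat
decreasing_by exact pvFuelStep_lt h

theorem measureFuel_foldl_eq (masses : List Int) (fuel : Int) :
    masses.foldl (fun fuel mass => measureFuelLoop fuel mass) fuel
      = fuel + (masses.map fuelFor).sum := by
  induction masses generalizing fuel with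
  | nil => simp
  | cons m rest ih =>
    rw [List.foldl_cons, ih, measureFuelLoop_eq]
    simp only [List.map_cons, List.sum_cons]
    ring

-- B's worklist computes the part-one sum when partTwo = false
theorem measureFuelWork_false (stack : List Int) (total : Int) :
    measureFuelWork false total stack
      = total + (stack.map (fun mass => PySem.Int.floordiv mass 3 - 2)).sum := by
  rw [measureFuelWork]
  by_cases h : stack = []
  · simp [h]
  · simp only [dif_neg h]
    rw [measureFuelWork_false]
    have hs : stack.dropLast ++ [stack.getLast h] = stack := List.dropLast_concat_getLast h
    conv_rhs => rw [← hs]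
    simp
    ring
termination_by stack.length
decreasing_by
  have h1 : stack.dropLast.length = stack.length - 1 := List.length_dropLast
  have h2 : 0 < stack.length := List.length_pos_of_ne_nil h
  omega

-- B's worklist computes the sum of full fuel chains when partTwo = true
theorem measureFuelWork_true (stack : List Int) (total : Int) :
    measureFuelWork true total stack = total + (stack.map fuelFor).sum := by
  rw [measureFuelWork]
  by_cases h : stack = []
  · simp [h]
  · have hs : stack.dropLast ++ [stack.getLast h] = stack := List.dropLast_concat_getLast h
    simp only [dif_neg h, if_neg (by simp : ¬ (true = false))]
    by_cases hf : PySem.Int.floordiv (stack.getLast h) 3 - 2 > 0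
    · simp only [dif_pos hf]
      rw [measureFuelWork_true]
      conv_rhs => rw [← hs]
      have hfe : fuelFor (stack.getLast h)
          = (PySem.Int.floordiv (stack.getLast h) 3 - 2)
            + fuelFor (PySem.Int.floordiv (stack.getLast h) 3 - 2) := by
        rw [fuelFor]; simp only [if_neg (by omega : ¬ PySem.Int.floordiv (stack.getLast h) 3 - 2 ≤ 0)]
      simp [hfe]
      ring
    · simp only [dif_neg hf]
      rw [measureFuelWork_true]
      conv_rhs => rw [← hs]
      have hfe : fuelFor (stack.getLast h) = 0 := by
        rw [fuelFor]; simp only [if_pos (by omega : PySem.Int.floordiv (stack.getLast h) 3 - 2 ≤ 0)]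
      simp [hfe]
termination_by (stack.map Int.toNat).sum + stack.length
decreasing_by
  · have h1 := pvMeasure_pop stack h
    have h2 := pvMeasure_push stack.dropLast (PySem.Int.floordiv (stack.getLast h) 3 - 2)
    have hlt := pvFuelStep_lt (m := stack.getLast h) hf
    omega
  · have := pvMeasure_pop stack h
    omega

-- ===== VERDICT (by name: the statement is the Claim_ definition above) =====
theorem measureFuel_spec : Claim_equal_measureFuel := by
  intro masses partTwo _
  unfold Spec_measureFuel measureFuel measureFuel_alt
  cases partTwo
  · simp [measureFuelWork_false]
  · simp [measureFuelWork_true, measureFuel_foldl_eq]
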